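-- pv_equiv track=rewrite | github.com/CowZix/aoc25 | day1/day1.py | cross_count
-- ===== SOURCE A (Python) =====
-- def wrap(current: int, move: int)-> int:
--     input = (current + move) % 100
--     if (input < 0):
--         output = input + 100
--     else:
--         output = input
--
--     return output
--
-- def cross_count(current: int, move: int)-> int:
--     count = 0
--     for i in range(abs(move)):
--         if move > 0:
--             current += 1
--         else:
--             current -= 1
--         current = wrap(current, 0)
--
--         if current == 0:
--             count += 1
--     return count
-- ===== SOURCE B (Python) =====
-- def cross_count(current: int, move: int) -> int:
--     # O(1): count multiples of 100 in the half-open traversed range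
--     if move >= 0:
--         return (current + move) // 100 - current // 100
--     return (current - 1) // 100 - (current + move - 1) // 100
-- ===== Notes on version B (the rewrite author's own statement) =====
-- stated objective: faster
-- what changed: Replaced A's per-unit stepping loop (one wrap and zero-check per unit of |move|) with a closed-form count of multiples of 100 in the traversed range via two floor divisions.
import Mathlib
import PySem

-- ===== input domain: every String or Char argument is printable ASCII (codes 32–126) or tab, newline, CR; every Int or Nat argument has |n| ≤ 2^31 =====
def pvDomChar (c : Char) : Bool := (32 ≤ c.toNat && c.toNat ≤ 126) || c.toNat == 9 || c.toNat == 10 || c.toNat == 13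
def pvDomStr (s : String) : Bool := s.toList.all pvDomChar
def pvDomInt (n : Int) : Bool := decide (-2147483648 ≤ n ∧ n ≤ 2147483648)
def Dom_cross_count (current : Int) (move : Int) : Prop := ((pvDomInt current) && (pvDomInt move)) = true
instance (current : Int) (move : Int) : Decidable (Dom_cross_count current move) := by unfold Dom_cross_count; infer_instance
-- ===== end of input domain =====

-- B replaces A's step-by-step O(|move|) walk with an O(1) closed-form count of
-- multiples of 100 in the traversed integer range (floor division).

-- ===== PORT A =====
def wrap (current : Int) (move : Int) : Int :=
  let input := PySem.Int.mod (current + move) 100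
  if input < 0 then input + 100 else input

def cross_count (current : Int) (move : Int) : Int :=
  ((PySem.List.pyRange 0 |move| 1).foldl
    (fun (st : Int × Int) (_ : Int) =>
      let cur := wrap (if move > 0 then st.1 + 1 else st.1 - 1) 0
      (cur, if cur = 0 then st.2 + 1 else st.2))
    (current, 0)).2

-- ===== PORT B =====
def cross_count_alt (current : Int) (move : Int) : Int :=
  if move ≥ 0 then
    PySem.Int.floordiv (current + move) 100 - PySem.Int.floordiv current 100
  else
    PySem.Int.floordiv (current - 1) 100 - PySem.Int.floordiv (current + move - 1) 100

-- ===== PRECONDITION & SPEC =====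
def Spec_cross_count (current : Int) (move : Int) (out : Int) : Prop := out = cross_count_alt current move
instance (current : Int) (move : Int) (out : Int) : Decidable (Spec_cross_count current move out) := by unfold Spec_cross_count; infer_instance

-- ===== CLAIM (what is proved, stated in full; the proofs are below) =====
def Claim_equal_cross_count : Prop := ∀ (current : Int) (move : Int), Dom_cross_count current move → Spec_cross_count current move (cross_count current move)

-- ===== LEMMAS AND PROOFS =====

theorem wrap_eq (a : Int) : wrap a 0 = a % 100 := by
  simp only [wrap, add_zero, PySem.Int.mod_eq_emod_of_pos (a := a) (by norm_num : (0:Int) < 100)]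
  rw [if_neg (by have := Int.emod_nonneg a (by norm_num : (100:Int) ≠ 0); omega)]

def stepP (st : Int × Int) : Int × Int :=
  (wrap (st.1 + 1) 0, if wrap (st.1 + 1) 0 = 0 then st.2 + 1 else st.2)

def stepN (st : Int × Int) : Int × Int :=
  (wrap (st.1 - 1) 0, if wrap (st.1 - 1) 0 = 0 then st.2 + 1 else st.2)

theorem foldl_const_iterate {α β : Type} (f : α → α) (l : List β) (s : α) :
    l.foldl (fun a _ => f a) s = f^[l.length] s := by
  induction l generalizing s with
  | nil => rfl
  | cons x xs ih => simp [List.foldl_cons, ih, Function.iterate_succ_apply]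

theorem stepP_iter (c k : Int) (n : Nat) :
    stepP^[n] (c, k) =
      if n = 0 then (c, k) else ((c + n) % 100, k + (c + n) / 100 - c / 100) := by
  induction n with
  | zero => simp
  | succ m ih =>
    rw [Function.iterate_succ_apply', ih]
    by_cases hm : m = 0
    · subst hm
      simp only [if_neg (Nat.one_ne_zero), stepP, wrap_eq]
      push_cast
      rw [Prod.mk.injEq]
      constructor <;> (try split_ifs) <;> omega
    · rw [if_neg hm, if_neg (Nat.succ_ne_zero m)]
      simp only [stepP, wrap_eq]
      push_cast
      rw [Prod.mk.injEq]
      constructor <;> (try split_ifs) <;> omega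

theorem stepN_iter (c k : Int) (n : Nat) :
    stepN^[n] (c, k) =
      if n = 0 then (c, k) else ((c - n) % 100, k + (c - 1) / 100 - (c - n - 1) / 100) := by
  induction n with
  | zero => simp
  | succ m ih =>
    rw [Function.iterate_succ_apply', ih]
    by_cases hm : m = 0
    · subst hm
      simp only [if_neg (Nat.one_ne_zero), stepN, wrap_eq]
      push_cast
      rw [Prod.mk.injEq]
      constructor <;> (try split_ifs) <;> omega
    · rw [if_neg hm, if_neg (Nat.succ_ne_zero m)]
      simp only [stepN, wrap_eq]
      push_cast
      rw [Prod.mk.injEq]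
      constructor <;> (try split_ifs) <;> omega

theorem cross_count_eq_iter (c m : Int) :
    cross_count c m =
      ((if m > 0 then stepP else stepN)^[m.natAbs] (c, 0)).2 := by
  unfold cross_count
  have hlam : (fun (st : Int × Int) (_ : Int) =>
      let cur := wrap (if m > 0 then st.1 + 1 else st.1 - 1) 0
      (cur, if cur = 0 then st.2 + 1 else st.2)) =
      (fun (st : Int × Int) (_ : Int) => (if m > 0 then stepP else stepN) st) := by
    funext st i
    by_cases hm : m > 0 <;> simp [hm, stepP, stepN]
  rw [hlam, foldl_const_iterate, PySem.List.length_pyRange_one]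
  congr 2
  simp only [sub_zero, Int.abs_eq_natAbs, Int.toNat_natCast]

theorem cross_count_spec' (c m : Int) : cross_count c m = cross_count_alt c m := by
  rw [cross_count_eq_iter]
  rcases lt_trichotomy m 0 with hm | hm | hm
  · rw [if_neg (by omega), stepN_iter,
      if_neg (by omega : ¬ m.natAbs = 0)]
    simp only [cross_count_alt, if_neg (by omega : ¬ m ≥ 0)]
    rw [PySem.Int.floordiv_eq_ediv_of_pos (by norm_num),
        PySem.Int.floordiv_eq_ediv_of_pos (by norm_num)]
    have : (m.natAbs : Int) = -m := by omega
    rw [this]; ring_nf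
  · subst hm
    simp [cross_count_alt]
  · rw [if_pos hm, stepP_iter, if_neg (by omega : ¬ m.natAbs = 0)]
    simp only [cross_count_alt, if_pos (le_of_lt hm)]
    rw [PySem.Int.floordiv_eq_ediv_of_pos (by norm_num),
        PySem.Int.floordiv_eq_ediv_of_pos (by norm_num)]
    have : (m.natAbs : Int) = m := by omega
    rw [this]; ring_nf

-- ===== VERDICT (by name: the statement is the Claim_ definition above) =====
theorem cross_count_spec : Claim_equal_cross_count := by
  intro c m _
  exact cross_count_spec' c m
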